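-- pv_equiv track=rewrite | github.com/Seok93/algorithm-study | sparta_algorithm_lecture/week_02/homework/02_is_available_to_order.py | is_available_to_order
-- ===== SOURCE A (Python) =====
-- def is_available_to_order(menus, orders):
--     menus.sort()
--     for order in orders:
--         start_idx = 0
--         end_idx = len(menus) - 1
--         while True:
--             if start_idx > end_idx:
--                 return False
--
--             mid_idx = (start_idx + end_idx) // 2
--             if order > menus[mid_idx]:
--                 start_idx = mid_idx + 1
--             elif order < menus[mid_idx]:
--                 end_idx = mid_idx - 1
--             else:
--                 break
--
--     return True
-- ===== SOURCE B (Python) =====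
-- def is_available_to_order(menus, orders):
--     menus.sort()
--     available = set(menus)
--     return all(order in available for order in orders)
-- ===== Notes on version B (the rewrite author's own statement) =====
-- stated objective: idiomatic
-- what changed: Replaced the per-order hand-written binary search over the sorted list with a set built once and membership tests via 'all', keeping the in-place menus.sort() for the caller-visible mutation.
import Mathlib
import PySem

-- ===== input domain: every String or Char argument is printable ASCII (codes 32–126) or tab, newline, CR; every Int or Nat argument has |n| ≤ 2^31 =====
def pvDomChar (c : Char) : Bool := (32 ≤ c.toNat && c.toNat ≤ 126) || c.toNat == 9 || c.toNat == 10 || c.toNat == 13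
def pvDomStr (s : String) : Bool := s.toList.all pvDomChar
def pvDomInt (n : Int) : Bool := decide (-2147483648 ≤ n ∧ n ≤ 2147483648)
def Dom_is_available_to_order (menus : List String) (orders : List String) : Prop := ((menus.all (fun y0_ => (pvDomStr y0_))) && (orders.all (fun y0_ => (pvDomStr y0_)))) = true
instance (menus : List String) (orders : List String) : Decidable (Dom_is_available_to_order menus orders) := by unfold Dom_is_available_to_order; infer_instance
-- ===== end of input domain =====

-- B replaces A's per-order binary search by a set built once and plain membership tests;
-- both A and B sort `menus` in place (same side effect); equivalence is about the return value.

-- ===== PORT A =====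
-- A's inner `while True` binary search: returns false on exhaustion, true on a hit.
-- The `none` branch of pyGet? is a totality guard only (A's indices are always in range).
def pvBSearch (ms : List String) (order : String) (lo hi : Int) : Bool :=
  if _h : lo > hi then false
  else
    let mid := PySem.Int.floordiv (lo + hi) 2
    match PySem.List.pyGet? ms mid with
    | none => false
    | some v =>
      if order > v then pvBSearch ms order (mid + 1) hi
      else if order < v then pvBSearch ms order lo (mid - 1)
      else true
termination_by (hi + 1 - lo).toNat
decreasing_by
  · have := PySem.Int.floordiv_two_mid_bounds (lo := lo) (hi := hi) (by omega)
    omega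
  · have := PySem.Int.floordiv_two_mid_bounds (lo := lo) (hi := hi) (by omega)
    omega

def is_available_to_order (menus : List String) (orders : List String) : Bool :=
  let ms := PySem.List.sorted menus (fun x => x) false
  orders.all (fun order => pvBSearch ms order 0 ((ms.length : Int) - 1))

-- ===== PORT B =====
def is_available_to_order_alt (menus : List String) (orders : List String) : Bool :=
  let ms := PySem.List.sorted menus (fun x => x) false
  let available : PySem.Set String := PySem.Set.ofList ms
  orders.all (fun order => PySem.Set.contains available order)

-- ===== PRECONDITION & SPEC =====
def Spec_is_available_to_order (menus : List String) (orders : List String) (out : Bool) : Prop := out = is_available_to_order_alt menus orders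
instance (menus : List String) (orders : List String) (out : Bool) : Decidable (Spec_is_available_to_order menus orders out) := by unfold Spec_is_available_to_order; infer_instance

-- ===== CLAIM (what is proved, stated in full; the proofs are below) =====
def Claim_equal_is_available_to_order : Prop := ∀ (menus : List String) (orders : List String), Dom_is_available_to_order menus orders → Spec_is_available_to_order menus orders (is_available_to_order menus orders)

-- ===== LEMMAS AND PROOFS =====

-- Binary search on a monotone list, with all positions of `o` confined to [lo, hi],
-- decides membership.
theorem pvBSearch_eq_contains (s : List String) (o : String) (lo hi : Int)
    (hmono : ∀ p q : Nat, (hpq : p ≤ q) → (hq : q < s.length) → s[p]'(Nat.lt_of_le_of_lt hpq hq) ≤ s[q])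
    (hlo : 0 ≤ lo)
    (hhi : hi < (s.length : Int))
    (hinv : ∀ i : Nat, (h : i < s.length) → s[i] = o → lo ≤ (i : Int) ∧ (i : Int) ≤ hi) :
    pvBSearch s o lo hi = s.contains o := by
  induction hn : (hi + 1 - lo).toNat using Nat.strong_induction_on generalizing lo hi with
  | _ n ih =>
  rw [pvBSearch]
  split
  · -- lo > hi : o ∉ s
    rename_i hgt
    have hno : o ∉ s := by
      intro hmem
      obtain ⟨i, hi2, heq⟩ := List.mem_iff_getElem.mp hmem
      rcases hinv i hi2 heq with ⟨h1, h2⟩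
      omega
    symm
    simpa using hno
  · rename_i hle
    have hmid := PySem.Int.floordiv_two_mid_bounds (lo := lo) (hi := hi) (by omega)
    obtain ⟨m, hm⟩ : ∃ m : Nat, PySem.Int.floordiv (lo + hi) 2 = (m : Int) :=
      ⟨(PySem.Int.floordiv (lo + hi) 2).toNat, by omega⟩
    have hmidlt : m < s.length := by omega
    simp only [hm, PySem.List.pyGet?_natCast, List.getElem?_eq_getElem hmidlt]
    split
    · rename_i hgt2
      apply ih ((hi + 1 - (↑m + 1)).toNat) (by omega) _ _ (by omega) hhi _ rfl
      intro i hi2 heq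
      rcases hinv i hi2 heq with ⟨h1, h2⟩
      refine ⟨?_, h2⟩
      by_contra hc
      push Not at hc
      have hle2 : i ≤ m := by omega
      have := hmono i m hle2 hmidlt
      rw [heq] at this
      exact absurd (lt_of_le_of_lt this hgt2) (lt_irrefl _)
    · rename_i hgt2
      split
      · rename_i hlt2
        apply ih ((↑m - 1 + 1 - lo).toNat) (by omega) _ _ hlo (by omega) _ rfl
        intro i hi2 heq
        rcases hinv i hi2 heq with ⟨h1, h2⟩
        refine ⟨h1, ?_⟩
        by_contra hc
        push Not at hc
        have hle2 : m ≤ i := by omega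
        have := hmono m i hle2 hi2
        rw [heq] at this
        exact absurd (lt_of_lt_of_le hlt2 this) (lt_irrefl _)
      · rename_i hlt2
        have heq : o = s[m] := le_antisymm (not_lt.mp hgt2) (not_lt.mp hlt2)
        symm
        simpa using (heq ▸ List.getElem_mem hmidlt)


theorem pt_eq (menus : List String) (o : String) :
    pvBSearch (PySem.List.sorted menus (fun x => x) false) o 0
      ((((PySem.List.sorted menus (fun x => x) false).length : Int)) - 1)
      = PySem.Set.contains (PySem.Set.ofList (PySem.List.sorted menus (fun x => x) false)) o := by
  rw [pvBSearch_eq_contains]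
  · simp [pysem]
  · exact fun p q hpq hq => PySem.List.sorted_id_getElem_mono menus hpq hq
  · omega
  · omega
  · intro i h _
    omega

theorem is_available_to_order_spec : Claim_equal_is_available_to_order := by
  intro menus orders _
  unfold Spec_is_available_to_order is_available_to_order is_available_to_order_alt
  simp only [pt_eq]
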